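-- pv_equiv track=rewrite | github.com/pypi-data/pypi-mirror-401 | packages/klaude-code/klaude_code-2.10.0.tar.gz/klaude_code-2.10.0/src/klaude_code/tui/command/fork_session_cmd.py | _preview_compaction_summary
-- ===== SOURCE A (Python) =====
-- def _first_non_empty_line(text: str) -> str:
--     for line in text.splitlines():
--         stripped = line.strip()
--         if stripped:
--             return stripped
--     return ""
--
-- def _preview_compaction_summary(summary: str) -> str:
--     """Return a human-friendly preview line for a CompactionEntry summary.
--
--     Compaction summaries may start with a fixed prefix line and may contain <summary> tags.
--     For UI previews we want something more informative than the prefix.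
--     """
--
--     cleaned = summary.replace("<summary>", "\n").replace("</summary>", "\n")
--     lines = [line.strip() for line in cleaned.splitlines()]
--     prefix = "the conversation history before this point was compacted"
--
--     def _is_noise(line: str) -> bool:
--         if not line:
--             return True
--         if line.casefold().startswith(prefix):
--             return True
--         return line in {"---", "----", "-----"}
--
--     # Prefer the first non-empty line under the "## Goal" section.
--     for i, line in enumerate(lines):
--         if line == "## Goal":
--             for j in range(i + 1, len(lines)):
--                 candidate = lines[j]
--                 if _is_noise(candidate):
--                     continue
--                 if candidate.startswith("## "):
--                     break
--                 return candidate
--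
--     # Otherwise, pick the first non-heading meaningful line.
--     for line in lines:
--         if _is_noise(line):
--             continue
--         if line.startswith("## "):
--             continue
--         return line
--
--     # Fallback: first non-empty line.
--     return _first_non_empty_line(cleaned)
-- ===== SOURCE B (Python) =====
-- def _preview_compaction_summary(summary: str) -> str:
--     """Single-pass re-implementation: one walk over the stripped lines with an
--     in_goal flag and a recorded first general line, instead of A's nested loops
--     plus a second full scan."""
--     cleaned = summary.replace("<summary>", "\n").replace("</summary>", "\n")
--     lines = [line.strip() for line in cleaned.splitlines()]
--     prefix = "the conversation history before this point was compacted"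
--
--     def _is_noise(line: str) -> bool:
--         if not line:
--             return True
--         if line.casefold().startswith(prefix):
--             return True
--         return line in {"---", "----", "-----"}
--
--     in_goal = False
--     first_general = None
--     for line in lines:
--         if line == "## Goal":
--             in_goal = True
--             continue
--         if _is_noise(line):
--             continue
--         if line.startswith("## "):
--             in_goal = False
--             continue
--         if in_goal:
--             return line
--         if first_general is None:
--             first_general = line
--     if first_general is not None:
--         return first_general
--     for line in lines:
--         if line:
--             return line
--     return ""
-- ===== Notes on version B (the rewrite author's own statement) =====
-- stated objective: simpler
-- what changed: Replaces A's nested loops (for every '## Goal' line a fresh inner scan of the tail) plus a separate second full scan for a general line by a single pass over the stripped lines carrying an in_goal flag and the first recorded general line.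
import Mathlib
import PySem

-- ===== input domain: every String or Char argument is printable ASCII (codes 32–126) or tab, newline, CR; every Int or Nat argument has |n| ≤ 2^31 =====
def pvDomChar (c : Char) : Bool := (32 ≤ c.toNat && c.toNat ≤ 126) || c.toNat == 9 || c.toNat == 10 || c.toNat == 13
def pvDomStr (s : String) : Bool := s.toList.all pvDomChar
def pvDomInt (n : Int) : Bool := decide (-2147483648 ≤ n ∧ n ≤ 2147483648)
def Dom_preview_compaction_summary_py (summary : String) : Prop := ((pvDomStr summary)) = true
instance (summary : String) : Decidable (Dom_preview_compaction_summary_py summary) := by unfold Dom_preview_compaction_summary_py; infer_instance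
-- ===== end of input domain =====

-- B replaces A's nested goal-section loops plus a second full scan by ONE pass over the
-- stripped lines carrying an in_goal flag and the first recorded general line (objective: simpler).

-- ===== PORT A =====

-- _first_non_empty_line: loop over text.splitlines(), return the first non-empty stripped line
def pvAFirstNonEmpty : List String → String
  | [] => ""
  | line :: rest =>
      let stripped := PySem.Str.strip line
      if stripped ≠ "" then stripped else pvAFirstNonEmpty rest

def pvPrefixStr : String := "the conversation history before this point was compacted"

-- _is_noise (A's local helper; casefold = lower on the ASCII domain)
def pvAIsNoise (line : String) : Bool :=
  if line = "" then true
  else if PySem.Str.startswith (PySem.Str.lower line) pvPrefixStr then true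
  else (line = "---" || line = "----" || line = "-----")

-- inner 'for j in range(i+1, len(lines))' loop: scan the lines after a "## Goal" line;
-- some c = the 'return candidate', none = 'break' on a heading or loop exhausted
def pvAInner : List String → Option String
  | [] => none
  | candidate :: rest =>
      if pvAIsNoise candidate then pvAInner rest
      else if PySem.Str.startswith candidate "## " then none
      else some candidate

-- outer 'for i, line in enumerate(lines)' loop: at each "## Goal" run the inner loop on the tail
def pvAOuter : List String → Option String
  | [] => none
  | line :: rest =>
      if line = "## Goal" then
        match pvAInner rest with
        | some r => some r
        | none => pvAOuter rest
      else pvAOuter rest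

-- second loop: first non-noise, non-heading line
def pvAGeneral : List String → Option String
  | [] => none
  | line :: rest =>
      if pvAIsNoise line then pvAGeneral rest
      else if PySem.Str.startswith line "## " then pvAGeneral rest
      else some line

def preview_compaction_summary_py (summary : String) : String :=
  let cleaned := PySem.Str.replace (PySem.Str.replace summary "<summary>" "\n") "</summary>" "\n"
  let lines := (PySem.Str.splitlines cleaned).map PySem.Str.strip
  match pvAOuter lines with
  | some r => r
  | none =>
      match pvAGeneral lines with
      | some r => r
      | none => pvAFirstNonEmpty (PySem.Str.splitlines cleaned)

-- ===== PORT B =====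

-- B's _is_noise (same body as A's helper)
def pvBIsNoise (line : String) : Bool :=
  if line = "" then true
  else if PySem.Str.startswith (PySem.Str.lower line) pvPrefixStr then true
  else (line = "---" || line = "----" || line = "-----")

-- B's single loop: state = (in_goal, first_general); 'return line' stops the walk,
-- falling off the end yields first_general (possibly none)
def pvBLoop : List String → Bool → Option String → Option String
  | [], _, firstGen => firstGen
  | line :: rest, inGoal, firstGen =>
      if line = "## Goal" then pvBLoop rest true firstGen
      else if pvBIsNoise line then pvBLoop rest inGoal firstGen
      else if PySem.Str.startswith line "## " then pvBLoop rest false firstGen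
      else if inGoal then some line
      else if firstGen = none then pvBLoop rest inGoal (some line)
      else pvBLoop rest inGoal firstGen

-- B's trailing fallback loop: first truthy (non-empty) element of the stripped lines
def pvBFallback : List String → String
  | [] => ""
  | line :: rest => if line ≠ "" then line else pvBFallback rest

def preview_compaction_summary_py_alt (summary : String) : String :=
  let cleaned := PySem.Str.replace (PySem.Str.replace summary "<summary>" "\n") "</summary>" "\n"
  let lines := (PySem.Str.splitlines cleaned).map PySem.Str.strip
  match pvBLoop lines false none with
  | some r => r
  | none => pvBFallback lines

-- ===== PRECONDITION & SPEC =====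
def Spec_preview_compaction_summary_py (summary : String) (out : String) : Prop := out = preview_compaction_summary_py_alt summary
instance (summary : String) (out : String) : Decidable (Spec_preview_compaction_summary_py summary out) := by unfold Spec_preview_compaction_summary_py; infer_instance

-- ===== CLAIM (what is proved, stated in full; the proofs are below) =====
def Claim_equal_preview_compaction_summary_py : Prop := ∀ (summary : String), Dom_preview_compaction_summary_py summary → Spec_preview_compaction_summary_py summary (preview_compaction_summary_py summary)

-- ===== LEMMAS AND PROOFS =====

theorem pvIsNoise_eq (line : String) : pvBIsNoise line = pvAIsNoise line := rfl

-- the loop invariant: B's single pass equals A's loops combined with Option.or;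
-- the in_goal = true state corresponds to A's inner loop being active on the same tail
theorem pvLoop_eq (ls : List String) : ∀ fg : Option String,
    pvBLoop ls false fg = (pvAOuter ls).or (fg.or (pvAGeneral ls)) ∧
    pvBLoop ls true fg = (pvAInner ls).or ((pvAOuter ls).or (fg.or (pvAGeneral ls))) := by
  induction ls with
  | nil => intro fg; cases fg <;> simp [pvBLoop, pvAOuter, pvAInner, pvAGeneral]
  | cons line rest ih =>
    intro fg
    by_cases hg : line = "## Goal"
    · -- "## Goal": B re-enters goal state; A's outer runs the inner loop; it is a heading for pvAGeneral
      subst hg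
      have h1 : pvAIsNoise "## Goal" = false := by decide
      have h2 : PySem.Chars.startswith [Char.ofNat 35, Char.ofNat 35, Char.ofNat 32, Char.ofNat 71, Char.ofNat 111, Char.ofNat 97, Char.ofNat 108] [Char.ofNat 35, Char.ofNat 35, Char.ofNat 32] = true := by decide
      have hb : pvBLoop ("## Goal" :: rest) = fun _ fg => pvBLoop rest true fg := by
        funext ig fg; simp [pvBLoop]
      have ho : pvAOuter ("## Goal" :: rest) = (pvAInner rest).or (pvAOuter rest) := by
        simp only [pvAOuter]; cases pvAInner rest <;> simp [Option.or]
      have hi : pvAInner ("## Goal" :: rest) = none := by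
        simp [pvAInner, h1, h2]
      have hgen : pvAGeneral ("## Goal" :: rest) = pvAGeneral rest := by
        simp [pvAGeneral, h1, h2]
      refine ⟨?_, ?_⟩ <;>
        · rw [hb]
          simp only [ho, hi, hgen, (ih fg).2, Option.none_or]
          cases pvAInner rest <;> simp [Option.or_assoc]
    · by_cases hn : pvAIsNoise line = true
      · -- noise: skipped everywhere
        simp only [pvBLoop, pvAOuter, pvAInner, pvAGeneral, hg, pvIsNoise_eq, hn,
          if_true, if_false, ite_true, ite_false]
        exact ⟨(ih fg).1, (ih fg).2⟩
      · rw [Bool.not_eq_true] at hn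
        by_cases hh : PySem.Str.startswith line "## " = true
        · -- heading (≠ "## Goal"): B leaves goal state; A's inner breaks; skipped by pvAGeneral
          simp only [pvBLoop, pvAOuter, pvAInner, pvAGeneral, hg, pvIsNoise_eq, hn, hh,
            if_true, if_false, ite_true, ite_false, Bool.false_eq_true]
          exact ⟨(ih fg).1, by rw [(ih fg).1]; simp⟩
        · rw [Bool.not_eq_true] at hh
          -- general line: B returns it in goal state / records it; A's inner returns it,
          -- pvAGeneral yields it
          simp only [pvBLoop, pvAOuter, pvAInner, pvAGeneral, hg, pvIsNoise_eq, hn, hh,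
            if_true, if_false, ite_true, ite_false, Bool.false_eq_true]
          constructor
          · cases fg with
            | none => rw [(ih (some line)).1]; simp
            | some g => rw [(ih (some g)).1]; simp
          · simp

theorem pvFallback_eq (raw : List String) :
    pvBFallback (raw.map PySem.Str.strip) = pvAFirstNonEmpty raw := by
  induction raw with
  | nil => rfl
  | cons line rest ih =>
    simp only [List.map_cons, pvBFallback, pvAFirstNonEmpty]
    split_ifs with h
    · rfl
    · exact ih

-- ===== VERDICT (by name: the statement is the Claim_ definition above) =====
theorem preview_compaction_summary_py_spec : Claim_equal_preview_compaction_summary_py := by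
  intro summary _
  unfold Spec_preview_compaction_summary_py preview_compaction_summary_py preview_compaction_summary_py_alt
  simp only
  rw [(pvLoop_eq _ none).1]
  cases ho : pvAOuter ((PySem.Str.splitlines (PySem.Str.replace (PySem.Str.replace summary "<summary>" "\n") "</summary>" "\n")).map PySem.Str.strip) with
  | some r => simp [Option.or]
  | none =>
    simp only [Option.or]
    cases hgn : pvAGeneral ((PySem.Str.splitlines (PySem.Str.replace (PySem.Str.replace summary "<summary>" "\n") "</summary>" "\n")).map PySem.Str.strip) with
    | some r => rfl
    | none => exact (pvFallback_eq _).symm
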